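-- pv_equiv track=rewrite | github.com/lhju4e/TIL | algo/pro_42587.py | solution
-- ===== SOURCE A (Python) =====
-- from collections import deque
--
-- def solution(priorities, location):
--     answer = 0
--     label = [0]*len(priorities)
--     label[location] = 1
--     order = deque([])
--     for i, j in zip(priorities, label):
--         order.append((i, j))
--
--     while order:
--         n = order.popleft()
--         if order and n[0] < max(order)[0]:
--             order.append(n)
--         else:
--             answer+= 1
--             if n[1] == 1:
--                 return answer
-- ===== SOURCE B (Python) =====
-- def solution(priorities, location):
--     queue = list(range(len(priorities)))
--     target = queue[location]
--     answer = 0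
--     while True:
--         best = max(priorities[i] for i in queue)
--         k = next(j for j, i in enumerate(queue) if priorities[i] == best)
--         answer += 1
--         if queue[k] == target:
--             return answer
--         queue = queue[k + 1:] + queue[:k]
-- ===== Notes on version B (the rewrite author's own statement) =====
-- stated objective: faster
-- what changed: B drops the deque simulation that rotates one element at a time (recomputing max over the whole deque on every pop) and instead jumps directly to the first maximal-priority document each round, slicing the index queue past it, so each printed document costs one scan instead of up to n rotations each with a full max scan.
import Mathlib
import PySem

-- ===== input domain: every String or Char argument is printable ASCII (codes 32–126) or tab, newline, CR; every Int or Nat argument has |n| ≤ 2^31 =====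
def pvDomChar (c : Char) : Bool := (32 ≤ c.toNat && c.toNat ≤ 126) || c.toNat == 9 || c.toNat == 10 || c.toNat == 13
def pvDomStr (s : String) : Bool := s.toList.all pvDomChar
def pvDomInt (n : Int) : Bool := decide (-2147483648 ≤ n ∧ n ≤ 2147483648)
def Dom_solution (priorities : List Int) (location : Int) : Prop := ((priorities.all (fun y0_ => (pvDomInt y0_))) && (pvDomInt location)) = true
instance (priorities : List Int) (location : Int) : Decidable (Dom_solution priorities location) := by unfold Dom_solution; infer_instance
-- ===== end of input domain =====

-- B replaces A's one-element-at-a-time deque rotation (with a full max scan per pop)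
-- by jumping straight to the first maximal-priority document each round; equivalence is on the return value.

-- ===== PORT A =====
-- helpers for A's termination measure: the running max of first components and
-- the index of the first maximal-priority element of the queue
def pvRunMax (xs : List (Int × Int)) (a : Int) : Int := xs.foldl (fun acc y => max acc y.1) a

def pvMaxF : List (Int × Int) → Int
  | [] => 0
  | x :: t => pvRunMax t x.1

def pvIdx (q : List (Int × Int)) : Nat := q.findIdx (fun x => x.1 == pvMaxF q)

theorem pvRunMax_max (xs : List (Int × Int)) : ∀ (a b : Int), pvRunMax xs (max a b) = max a (pvRunMax xs b) := by
  induction xs with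
  | nil => intro a b; simp [pvRunMax]
  | cons x t ih =>
    intro a b
    simp only [pvRunMax, List.foldl_cons] at *
    rw [max_assoc, ih]

theorem pvRunMax_attain (xs : List (Int × Int)) : ∀ (a : Int), pvRunMax xs a = a ∨ ∃ y ∈ xs, pvRunMax xs a = y.1 := by
  induction xs with
  | nil => intro a; left; rfl
  | cons x t ih =>
    intro a
    have h : pvRunMax (x :: t) a = pvRunMax t (max a x.1) := rfl
    rcases ih (max a x.1) with h1 | ⟨y, hy, hy2⟩
    · rcases max_choice a x.1 with hm | hm
      · left; rw [h, h1, hm]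
      · right; exact ⟨x, by simp, by rw [h, h1, hm]⟩
    · right; exact ⟨y, by simp [hy], by rw [h, hy2]⟩

theorem pvMaxF_cons (n x : Int × Int) (t : List (Int × Int)) :
    pvMaxF (n :: x :: t) = max n.1 (pvMaxF (x :: t)) := by
  show pvRunMax (x :: t) n.1 = max n.1 (pvRunMax t x.1)
  have h : pvRunMax (x :: t) n.1 = pvRunMax t (max n.1 x.1) := rfl
  rw [h, pvRunMax_max]

theorem pvMaxF_append (x n : Int × Int) (t : List (Int × Int)) :
    pvMaxF ((x :: t) ++ [n]) = max (pvMaxF (x :: t)) n.1 := by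
  show pvRunMax (t ++ [n]) x.1 = max (pvRunMax t x.1) n.1
  simp [pvRunMax, List.foldl_append]

theorem pvMaxF_attain (q : List (Int × Int)) (h : q ≠ []) : ∃ y ∈ q, y.1 = pvMaxF q := by
  match q with
  | x :: t =>
    rcases pvRunMax_attain t x.1 with h1 | ⟨y, hy, hy2⟩
    · exact ⟨x, by simp, h1.symm⟩
    · exact ⟨y, by simp [hy], hy2.symm⟩

-- Python max over (int, int) pairs compares lexicographically; its first component
-- is the running max of the first components.
theorem pv_max2_fst : ∀ (t : List (Int × Int)) (x : Int × Int),
    ((PySem.List.max2? (x :: t) Prod.fst Prod.snd).getD (0, 0)).1 = pvRunMax t x.1 := by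
  intro t
  induction t with
  | nil => intro x; simp [PySem.List.max2?, pvRunMax]
  | cons z t ih =>
    intro x
    have hstep : PySem.List.max2? (x :: z :: t) Prod.fst Prod.snd
        = PySem.List.max2? ((if (decide (x.1 < z.1) || !decide (z.1 < x.1) && decide (x.2 < z.2)) = true then z else x) :: t) Prod.fst Prod.snd := by
      unfold PySem.List.max2?
      simp only [List.foldl_cons]
      rw [apply_ite some]
    rw [hstep]
    have hRM : pvRunMax (z :: t) x.1 = pvRunMax t (max x.1 z.1) := rfl
    by_cases h1 : x.1 < z.1
    · rw [if_pos (by simp [h1]), ih z, hRM]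
      congr 1
      omega
    · by_cases h2 : z.1 < x.1
      · rw [if_neg (by simp [h1, h2]), ih x, hRM]
        congr 1
        omega
      · by_cases h3 : x.2 < z.2
        · rw [if_pos (by simp [h1, h2, h3]), ih z, hRM]
          congr 1
          omega
        · rw [if_neg (by simp [h1, h2, h3]), ih x, hRM]
          congr 1
          omega

theorem pvIdx_rotate (n : Int × Int) (rest : List (Int × Int)) (hne : rest ≠ [])
    (hlt : n.1 < pvMaxF rest) : pvIdx (rest ++ [n]) < pvIdx (n :: rest) := by
  match rest, hne with
  | x :: t, _ =>
    have e1 : pvMaxF (n :: x :: t) = pvMaxF (x :: t) := by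
      rw [pvMaxF_cons]; omega
    have e2 : pvMaxF ((x :: t) ++ [n]) = pvMaxF (x :: t) := by
      rw [pvMaxF_append]; omega
    have hidx0 : List.findIdx (fun y => y.1 == pvMaxF (x :: t)) (x :: t) < (x :: t).length := by
      rcases pvMaxF_attain (x :: t) (by simp) with ⟨y, hy, hy2⟩
      exact List.findIdx_lt_length.mpr ⟨y, hy, by simp [hy2]⟩
    have h3 : pvIdx (n :: x :: t) = List.findIdx (fun y => y.1 == pvMaxF (x :: t)) (x :: t) + 1 := by
      unfold pvIdx
      rw [e1]
      have hfalse : (n.1 == pvMaxF (x :: t)) = false := by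
        simp only [beq_eq_false_iff_ne]; omega
      simp [List.findIdx_cons, hfalse]
    have h4 : pvIdx ((x :: t) ++ [n]) = List.findIdx (fun y => y.1 == pvMaxF (x :: t)) (x :: t) := by
      unfold pvIdx
      rw [e2, List.findIdx_append, if_pos hidx0]
    omega

theorem pv_decA1 (n : Int × Int) (rest : List (Int × Int)) (hne : rest ≠ [])
    (hlt : n.1 < ((PySem.List.max2? rest Prod.fst Prod.snd).getD (0, 0)).1) :
    (rest ++ [n]).length * ((rest ++ [n]).length + 1) + pvIdx (rest ++ [n])
      < (n :: rest).length * ((n :: rest).length + 1) + pvIdx (n :: rest) := by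
  have hlt' : n.1 < pvMaxF rest := by
    match rest, hne with
    | x :: t, _ =>
      show n.1 < pvRunMax t x.1
      rw [← pv_max2_fst t x]; exact hlt
  have hrot := pvIdx_rotate n rest hne hlt'
  have hlen : (rest ++ [n]).length = (n :: rest).length := by simp
  rw [hlen]
  omega

theorem pv_decA2 (n : Int × Int) (rest : List (Int × Int)) :
    rest.length * (rest.length + 1) + pvIdx rest
      < (n :: rest).length * ((n :: rest).length + 1) + pvIdx (n :: rest) := by
  have h1 : pvIdx rest ≤ rest.length := List.findIdx_le_length
  simp only [List.length_cons]
  nlinarith [h1]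

-- literal port of A's while-loop: pop the front; if something behind it has a strictly
-- larger priority (Python's max over the remaining pairs), requeue it at the back,
-- otherwise count the print and return when the popped document is the labelled one.
-- (The [] case is Python's implicit 'return None' after the loop; unreachable under Pre_.)
def pvLoopA : List (Int × Int) → Int → Int
  | [], _ => 0
  | n :: rest, answer =>
    if h : rest ≠ [] ∧ n.1 < ((PySem.List.max2? rest Prod.fst Prod.snd).getD (0, 0)).1 then
      pvLoopA (rest ++ [n]) answer
    else if n.2 == 1 then answer + 1
    else pvLoopA rest (answer + 1)
termination_by q _ => q.length * (q.length + 1) + pvIdx q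
decreasing_by
  · exact pv_decA1 n rest h.1 h.2
  · exact pv_decA2 n rest

def solution (priorities : List Int) (location : Int) : Int :=
  pvLoopA ((priorities.zip (PySem.List.pySetD (List.replicate priorities.length (0 : Int)) location 1)).foldl
    (fun acc ij => acc ++ [ij]) []) 0

-- ===== PORT B =====
-- helpers naming Source B's locals: best = max priority in the queue, k = index of its first holder
def pvRunMaxP (priorities : List Int) (xs : List Int) (a : Int) : Int :=
  xs.foldl (fun acc i => max acc (PySem.List.pyGetD priorities i 0)) a

def pvBest (priorities : List Int) (i0 : Int) (qt : List Int) : Int :=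
  pvRunMaxP priorities qt (PySem.List.pyGetD priorities i0 0)

def pvK (priorities : List Int) (i0 : Int) (qt : List Int) : Nat :=
  List.findIdx (fun i => PySem.List.pyGetD priorities i 0 == pvBest priorities i0 qt) (i0 :: qt)

theorem pvRunMaxP_attain (priorities : List Int) (xs : List Int) :
    ∀ (a : Int), pvRunMaxP priorities xs a = a ∨ ∃ i ∈ xs, pvRunMaxP priorities xs a = PySem.List.pyGetD priorities i 0 := by
  induction xs with
  | nil => intro a; left; rfl
  | cons x t ih =>
    intro a
    have h : pvRunMaxP priorities (x :: t) a = pvRunMaxP priorities t (max a (PySem.List.pyGetD priorities x 0)) := rfl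
    rcases ih (max a (PySem.List.pyGetD priorities x 0)) with h1 | ⟨i, hi, hi2⟩
    · rcases max_choice a (PySem.List.pyGetD priorities x 0) with hm | hm
      · left; rw [h, h1, hm]
      · right; exact ⟨x, by simp, by rw [h, h1, hm]⟩
    · right; exact ⟨i, by simp [hi], by rw [h, hi2]⟩

theorem pvK_lt_length (priorities : List Int) (i0 : Int) (qt : List Int) :
    pvK priorities i0 qt < (i0 :: qt).length := by
  apply List.findIdx_lt_length.mpr
  rcases pvRunMaxP_attain priorities qt (PySem.List.pyGetD priorities i0 0) with h1 | ⟨i, hi, hi2⟩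
  · exact ⟨i0, by simp, by simp [pvBest, h1]⟩
  · exact ⟨i, by simp [hi], by simp [pvBest, hi2]⟩

theorem pv_decB (priorities : List Int) (i0 : Int) (qt : List Int) :
    ((i0 :: qt).drop (pvK priorities i0 qt + 1) ++ (i0 :: qt).take (pvK priorities i0 qt)).length
      < (i0 :: qt).length := by
  have := pvK_lt_length priorities i0 qt
  rw [List.length_append, List.length_drop, List.length_take]
  simp only [List.length_cons] at *
  omega

-- literal port of Source B's loop: find the first index k of a maximal-priority document,
-- count its print, return if it is the target, else continue on the queue rotated past it.
-- (The [] case is unreachable: the target is always still queued.)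
def pvLoopB (priorities : List Int) (target : Int) : List Int → Int → Int
  | [], _ => 0
  | i0 :: qt, answer =>
    if (i0 :: qt).getD (pvK priorities i0 qt) 0 == target then answer + 1
    else pvLoopB priorities target
      ((i0 :: qt).drop (pvK priorities i0 qt + 1) ++ (i0 :: qt).take (pvK priorities i0 qt)) (answer + 1)
termination_by q _ => q.length
decreasing_by
  exact pv_decB priorities i0 qt

def solution_alt (priorities : List Int) (location : Int) : Int :=
  pvLoopB priorities
    (PySem.List.pyGetD (PySem.List.pyRange 0 (priorities.length : Int) 1) location 0)
    (PySem.List.pyRange 0 (priorities.length : Int) 1) 0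

-- ===== PRECONDITION & SPEC =====
-- Pre_ excludes exactly the inputs where A raises IndexError (label[location] with
-- location out of range, including the empty list); B raises there too (range(n)[location]).
def Pre_solution (priorities : List Int) (location : Int) : Prop :=
  PySem.Raise.InRange priorities.length location
instance (priorities : List Int) (location : Int) : Decidable (Pre_solution priorities location) := by
  unfold Pre_solution; infer_instance

def pvWitness_solution : List Int × Int := ([2, 1, 3, 2], 2)

def Spec_solution (priorities : List Int) (location : Int) (out : Int) : Prop := out = solution_alt priorities location
instance (priorities : List Int) (location : Int) (out : Int) : Decidable (Spec_solution priorities location out) := by unfold Spec_solution; infer_instance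

-- ===== CLAIM (what is proved, stated in full; the proofs are below) =====
def Claim_equal_solution : Prop := ∀ (priorities : List Int) (location : Int), Dom_solution priorities location → Pre_solution priorities location → Spec_solution priorities location (solution priorities location)

-- ===== LEMMAS AND PROOFS =====

def pvF (priorities : List Int) (target : Int) (i : Int) : Int × Int :=
  (PySem.List.pyGetD priorities i 0, if i == target then (1 : Int) else 0)

theorem pv_foldl_app (l acc : List (Int × Int)) : l.foldl (fun acc ij => acc ++ [ij]) acc = acc ++ l := by
  induction l generalizing acc with
  | nil => simp
  | cons x t ih => simp [List.foldl_cons, ih]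

-- one "round" of A's loop: rotate to the first maximum and pop it
theorem pvLoopA_step : ∀ (K : Nat) (q : List (Int × Int)), pvIdx q = K → q ≠ [] → ∀ (ans : Int),
    pvLoopA q ans = if (q.getD (pvIdx q) (0, 0)).2 == 1 then ans + 1
      else pvLoopA (q.drop (pvIdx q + 1) ++ q.take (pvIdx q)) (ans + 1) := by
  intro K
  induction K using Nat.strong_induction_on with
  | _ K ih =>
    intro q hK hq ans
    match q with
    | n :: rest =>
      by_cases hc : rest ≠ [] ∧ n.1 < ((PySem.List.max2? rest Prod.fst Prod.snd).getD (0, 0)).1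
      · obtain ⟨hne, hlt0⟩ := hc
        match rest, hne with
        | x :: t, _ =>
          have hlt : n.1 < pvMaxF (x :: t) := by
            show n.1 < pvRunMax t x.1
            rw [← pv_max2_fst t x]; exact hlt0
          have e1 : pvMaxF (n :: x :: t) = pvMaxF (x :: t) := by
            rw [pvMaxF_cons]; omega
          have e2 : pvMaxF ((x :: t) ++ [n]) = pvMaxF (x :: t) := by
            rw [pvMaxF_append]; omega
          obtain ⟨j, hjdef⟩ : ∃ j, List.findIdx (fun y => y.1 == pvMaxF (x :: t)) (x :: t) = j := ⟨_, rfl⟩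
          have hjlt : j < t.length + 1 := by
            rw [← hjdef]
            rcases pvMaxF_attain (x :: t) (by simp) with ⟨y, hy, hy2⟩
            simpa using List.findIdx_lt_length.mpr ⟨y, hy, by simp [hy2]⟩
          have h3 : pvIdx (n :: x :: t) = j + 1 := by
            unfold pvIdx
            rw [e1]
            have hfalse : (n.1 == pvMaxF (x :: t)) = false := by
              simp only [beq_eq_false_iff_ne]; omega
            simp [List.findIdx_cons, hfalse, hjdef]
          have h4 : pvIdx ((x :: t) ++ [n]) = j := by
            unfold pvIdx
            rw [e2, List.findIdx_append, if_pos (by rw [hjdef]; simpa using hjlt)]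
            exact hjdef
          have hrec : pvLoopA (n :: x :: t) ans = pvLoopA ((x :: t) ++ [n]) ans := by
            rw [pvLoopA.eq_def]
            dsimp only
            rw [dif_pos ⟨by simp, hlt0⟩]
          rw [hrec, ih j (by omega) _ h4 (by simp) ans, h4, h3]
          have c1 : ((x :: t) ++ [n]).getD j (0, 0) = (n :: x :: t).getD (j + 1) (0, 0) := by
            rw [List.getD_eq_getElem _ _ (by simp; omega), List.getD_eq_getElem _ _ (by simp; omega)]
            rw [List.getElem_append_left (by simpa using hjlt)]
            simp
          have c2 : ((x :: t) ++ [n]).drop (j + 1) ++ ((x :: t) ++ [n]).take j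
              = (n :: x :: t).drop (j + 1 + 1) ++ (n :: x :: t).take (j + 1) := by
            rw [List.drop_append_of_le_length (by simp; omega), List.take_append_of_le_length (by simp; omega)]
            simp [List.append_assoc]
          rw [c1, c2]
      · have hmax : pvMaxF (n :: rest) = n.1 := by
          match rest with
          | [] => rfl
          | x :: t =>
            have hle : pvMaxF (x :: t) ≤ n.1 := by
              show pvRunMax t x.1 ≤ n.1
              rcases not_and_or.mp hc with h | h
              · exact absurd (by simp) h
              · rw [← pv_max2_fst t x]; omega
            rw [pvMaxF_cons]; omega
        have h0 : pvIdx (n :: rest) = 0 := by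
          unfold pvIdx
          simp [List.findIdx_cons, hmax]
        have hstep : pvLoopA (n :: rest) ans = if n.2 == 1 then ans + 1 else pvLoopA rest (ans + 1) := by
          rw [pvLoopA.eq_def]
          dsimp only
          rw [dif_neg hc]
        rw [hstep, h0]
        simp

-- the bridge: A's queue of (priority, label) pairs is B's index queue mapped through pvF
theorem pv_bridge (priorities : List Int) (target : Int) :
    ∀ (N : Nat) (q : List Int), q.length = N → ∀ (ans : Int),
    pvLoopA (q.map (pvF priorities target)) ans = pvLoopB priorities target q ans := by
  intro N
  induction N using Nat.strong_induction_on with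
  | _ N ih =>
    intro q hN ans
    match q with
    | [] => simp [pvLoopA.eq_def, pvLoopB.eq_def]
    | i0 :: qt =>
      have m1 : pvMaxF ((i0 :: qt).map (pvF priorities target)) = pvBest priorities i0 qt := by
        simp only [List.map_cons, pvMaxF, pvRunMax, pvBest, pvRunMaxP, List.foldl_map, pvF]
      have m2 : pvIdx ((i0 :: qt).map (pvF priorities target)) = pvK priorities i0 qt := by
        unfold pvIdx
        rw [List.findIdx_map, m1]
        rfl
      have hk : pvK priorities i0 qt < (i0 :: qt).length := pvK_lt_length priorities i0 qt
      have m3 : ((((i0 :: qt).map (pvF priorities target)).getD (pvK priorities i0 qt) (0, 0)).2 == 1)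
          = ((i0 :: qt).getD (pvK priorities i0 qt) 0 == target) := by
        rw [List.getD_eq_getElem _ _ (by simpa using hk), List.getD_eq_getElem _ _ hk]
        rw [List.getElem_map]
        unfold pvF
        by_cases h : ((i0 :: qt)[pvK priorities i0 qt] == target) = true
        · simp [h]
        · simp only [Bool.not_eq_true] at h
          simp [h]
      have m4 : ((i0 :: qt).map (pvF priorities target)).drop (pvK priorities i0 qt + 1)
            ++ ((i0 :: qt).map (pvF priorities target)).take (pvK priorities i0 qt)
          = ((i0 :: qt).drop (pvK priorities i0 qt + 1) ++ (i0 :: qt).take (pvK priorities i0 qt)).map (pvF priorities target) := by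
        simp [List.map_drop, List.map_take]
      rw [pvLoopA_step (pvIdx ((i0 :: qt).map (pvF priorities target))) _ rfl (by simp) ans]
      rw [m2, m3, m4]
      rw [pvLoopB.eq_def]
      dsimp only
      by_cases hcond : ((i0 :: qt).getD (pvK priorities i0 qt) 0 == target) = true
      · simp only [hcond, if_true]
      · simp only [Bool.not_eq_true] at hcond
        simp only [hcond, Bool.false_eq_true, if_false]
        apply ih (((i0 :: qt).drop (pvK priorities i0 qt + 1) ++ (i0 :: qt).take (pvK priorities i0 qt)).length)
          ?_ _ rfl
        rw [List.length_append, List.length_drop, List.length_take]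
        simp only [List.length_cons] at hk hN ⊢
        omega

-- the initial queues correspond: zip(priorities, label) = map pvF (range n)
theorem pv_init_generic (priorities : List Int) (idx : Nat) (_hidx : idx < priorities.length) :
    priorities.zip ((List.replicate priorities.length (0 : Int)).set idx 1)
      = (List.map (fun k : Nat => (k : Int)) (List.range priorities.length)).map (pvF priorities (idx : Int)) := by
  apply List.ext_getElem
  · simp
  · intro i h1 h2
    have hi : i < priorities.length := by simpa using h1
    rw [List.getElem_zip, List.getElem_map, List.getElem_map, List.getElem_range]
    unfold pvF
    simp only [Prod.mk.injEq]
    constructor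
    · rw [PySem.List.pyGetD_natCast, List.getD_eq_getElem _ _ hi]
    · rw [List.getElem_set]
      simp only [List.getElem_replicate]
      by_cases h : idx = i
      · simp [h]
      · have hne : ((i : Int) == (idx : Int)) = false := by
          simp only [beq_eq_false_iff_ne]
          intro hcontra
          exact h (by exact_mod_cast hcontra.symm)
        simp [h, hne]

-- ===== VERDICT (by name: the statement is the Claim_ definition above) =====
theorem solution_spec : Claim_equal_solution := by
  unfold Claim_equal_solution Spec_solution
  intro priorities location _ hpre
  unfold Pre_solution PySem.Raise.InRange at hpre
  obtain ⟨hlo, hhi⟩ := hpre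
  unfold solution solution_alt
  rw [pv_foldl_app, List.nil_append]
  rw [PySem.List.pyRange_zero_natCast]
  by_cases hsgn : 0 ≤ location
  · obtain ⟨m, rfl⟩ : ∃ m : Nat, location = (m : Int) := ⟨location.toNat, by omega⟩
    have hlt : m < priorities.length := by omega
    have htgt : PySem.List.pyGetD (List.map (fun k : Nat => (k : Int)) (List.range priorities.length)) (m : Int) 0
        = ((m : Nat) : Int) := by
      rw [PySem.List.pyGetD_natCast, List.getD_eq_getElem _ _ (by simpa using hlt)]
      rw [List.getElem_map, List.getElem_range]
    have hlab : PySem.List.pySetD (List.replicate priorities.length (0 : Int)) (m : Int) 1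
        = (List.replicate priorities.length (0 : Int)).set m 1 := by
      rw [PySem.List.pySetD_of_nonneg _ _ (by exact_mod_cast Nat.zero_le m)]
      simp
    rw [htgt, hlab, pv_init_generic priorities m hlt]
    exact pv_bridge priorities _ _ _ rfl 0
  · rw [not_le] at hsgn
    obtain ⟨m, rfl⟩ : ∃ m : Nat, location = -(m : Int) := ⟨(-location).toNat, by omega⟩
    have hm0 : 0 < m := by omega
    have hmle : m ≤ priorities.length := by omega
    have hlt : priorities.length - m < priorities.length := by omega
    have htgt : PySem.List.pyGetD (List.map (fun k : Nat => (k : Int)) (List.range priorities.length)) (-(m : Int)) 0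
        = ((priorities.length - m : Nat) : Int) := by
      rw [PySem.List.pyGetD_neg_natCast _ _ _ hm0 (by simpa using hmle)]
      rw [List.getElem_map]
      simp only [List.length_map, List.length_range, List.getElem_range]
    have hlab : PySem.List.pySetD (List.replicate priorities.length (0 : Int)) (-(m : Int)) 1
        = (List.replicate priorities.length (0 : Int)).set (priorities.length - m) 1 := by
      unfold PySem.List.pySetD PySem.List.pySet? PySem.List.pyIdx?
      simp only [List.length_replicate]
      rw [if_neg (by omega), if_pos (by omega)]
      simp
    rw [htgt, hlab, pv_init_generic priorities (priorities.length - m) hlt]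
    exact pv_bridge priorities _ _ _ rfl 0
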